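-- pv_equiv track=rewrite | github.com/Shaaldy/graph-algorithms | labs/lab1.py | kraskal_func
-- ===== SOURCE A (Python) =====
-- def init_union_find(n: int) -> tuple[list[int], list[int]]:
--     parent = list(range(n))
--     rank = [1] * n
--     return parent, rank
--
-- def find(parent: list[int], u: int) -> int:
--     if parent[u] != u:
--         parent[u] = find(parent, parent[u])
--     return parent[u]
--
-- def union(parent: list[int], rank: list[int], u: int, v: int) -> None:
--     root_u = find(parent, u)
--     root_v = find(parent, v)
--
--     if root_u != root_v:
--         if rank[root_u] > rank[root_v]:
--             parent[root_v] = root_u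
--         elif rank[root_u] < rank[root_v]:
--             parent[root_u] = root_v
--         else:
--             parent[root_v] = root_u
--             rank[root_u] += 1
--
-- def kraskal_func(points_diff: dict[tuple, int], n: int) -> tuple[list[list[int]], int]:
--     parent, rank = init_union_find(n)  # Инициализация Union-Find
--     lst = [[] for _ in range(n)]
--     res = 0
--     edge_count = 0
--
--     for (u, v) in points_diff.keys():
--         if find(parent, u) != find(parent, v):  # Если вершины принадлежат разным компонентам
--             union(parent, rank, u, v)  # Объединяем компоненты
--             lst[u].append(v + 1)
--             lst[v].append(u + 1)
--             res += points_diff[(u, v)]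
--             edge_count += 1
--
--         if edge_count == n - 1:
--             break
--
--     lst = [sorted(ls) + [0] for ls in lst]
--
--     return lst, res
-- ===== SOURCE B (Python) =====
-- def kraskal_func(points_diff, n):
--     # quick-find: comp[i] is the label of i's component; a merge relabels wholesale
--     comp = list(range(n))
--     chosen = []
--     res = 0
--     for (u, v), w in points_diff.items():
--         cu, cv = comp[u], comp[v]
--         if cu != cv:
--             comp = [cu if c == cv else c for c in comp]
--             chosen.append((u, v))
--             res += w
--             if len(chosen) == n - 1:
--                 break
--     adj = [sorted(b + 1 if a == i else a + 1
--                   for (a, b) in chosen if i in (a, b)) + [0]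
--            for i in range(n)]
--     return adj, res
-- ===== Notes on version B (the rewrite author's own statement) =====
-- stated objective: simpler
-- what changed: The union-find structure (recursive path-compressing find plus union by rank over two arrays) is replaced by a quick-find component-label array that is relabelled wholesale on each merge, and the adjacency lists are derived from the flat list of chosen edges after the loop instead of being maintained as n append-lists inside it.
-- outside the precondition, e.g. on kraskal_func({(-1, 0): 5}, 2): A returns ([[0, 0], [1, 0]], 5), B returns ([[0, 0], [0]], 5)
import Mathlib
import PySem

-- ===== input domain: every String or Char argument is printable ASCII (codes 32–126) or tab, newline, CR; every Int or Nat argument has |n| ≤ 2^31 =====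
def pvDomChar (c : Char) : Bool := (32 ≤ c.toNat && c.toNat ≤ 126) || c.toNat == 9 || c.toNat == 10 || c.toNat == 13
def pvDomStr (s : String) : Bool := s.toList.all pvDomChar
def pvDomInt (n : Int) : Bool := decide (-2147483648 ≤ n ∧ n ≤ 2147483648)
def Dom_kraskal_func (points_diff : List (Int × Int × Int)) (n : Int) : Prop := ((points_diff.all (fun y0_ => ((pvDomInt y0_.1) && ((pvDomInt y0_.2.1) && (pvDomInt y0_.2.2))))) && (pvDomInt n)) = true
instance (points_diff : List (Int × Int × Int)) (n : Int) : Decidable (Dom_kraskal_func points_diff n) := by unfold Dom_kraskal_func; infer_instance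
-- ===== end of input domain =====

-- B replaces the union-find structure (recursive path-compressing find + union by rank over two
-- arrays) by a quick-find component-label array relabelled wholesale on each merge, and derives
-- the adjacency lists from a flat list of chosen edges after the loop instead of maintaining n
-- append-lists inside it.  Return values agree on Pre_; neither version is claimed faster.
-- (A mutates nothing observable: its dict parameter is only read.)

-- ===== PORT A =====
-- find(parent, u) with path compression; the recursion gets fuel (len+1 at each call site),
-- 'none' = fuel exhausted or IndexError — Python would recurse forever / raise there.
def pvFindA : Nat → List Int → Int → Option (List Int × Int)
  | 0, _, _ => none
  | f + 1, p, u =>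
    match PySem.List.pyGet? p u with
    | none => none
    | some pu =>
      if pu ≠ u then
        match pvFindA f p pu with
        | none => none
        | some (p1, r) => some (PySem.List.pySetD p1 u r, r)   -- parent[u] = r; return parent[u]
      else some (p, u)

-- union(parent, rank, u, v)
def pvUnionA (fuel : Nat) (p rk : List Int) (u v : Int) : Option (List Int × List Int) :=
  match pvFindA fuel p u with
  | none => none
  | some (p1, ru) =>
    match pvFindA fuel p1 v with
    | none => none
    | some (p2, rv) =>
      if ru ≠ rv then
        match PySem.List.pyGet? rk ru, PySem.List.pyGet? rk rv with
        | some au, some av =>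
          if au > av then some (PySem.List.pySetD p2 rv ru, rk)
          else if au < av then some (PySem.List.pySetD p2 ru rv, rk)
          else some (PySem.List.pySetD p2 rv ru, PySem.List.pySetD rk ru (au + 1))
        | _, _ => none
      else some (p2, rk)

-- points_diff[(u, v)] : first (and on Pre_ only) matching key
def pvLookupA (pd : List (Int × Int × Int)) (u v : Int) : Option Int :=
  match pd with
  | [] => none
  | (a, b, w) :: rest => if a = u ∧ b = v then some w else pvLookupA rest u v

-- the 'for (u, v) in points_diff.keys()' loop; state = (parent, rank, lst, res, edge_count)
def pvLoopA (pd : List (Int × Int × Int)) (n : Int) :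
    List (Int × Int × Int) → List Int × List Int × List (List Int) × Int × Int →
    Option (List Int × List Int × List (List Int) × Int × Int)
  | [], st => some st
  | (u, v, _) :: rest, (p, rk, lst, res, cnt) =>
    match pvFindA (p.length + 1) p u with
    | none => none
    | some (p1, ru) =>
      match pvFindA (p1.length + 1) p1 v with
      | none => none
      | some (p2, rv) =>
        if ru ≠ rv then
          match pvUnionA (p2.length + 1) p2 rk u v with
          | none => none
          | some (p3, rk') =>
            match PySem.List.pyGet? lst u with
            | none => none
            | some lu =>
              let lst1 := PySem.List.pySetD lst u (lu ++ [v + 1])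
              match PySem.List.pyGet? lst1 v with
              | none => none
              | some lv =>
                let lst2 := PySem.List.pySetD lst1 v (lv ++ [u + 1])
                match pvLookupA pd u v with
                | none => none
                | some w =>
                  if (cnt + 1 : Int) = n - 1 then some (p3, rk', lst2, res + w, cnt + 1)
                  else pvLoopA pd n rest (p3, rk', lst2, res + w, cnt + 1)
        else
          if (cnt : Int) = n - 1 then some (p2, rk, lst, res, cnt)
          else pvLoopA pd n rest (p2, rk, lst, res, cnt)

def kraskal_func (points_diff : List (Int × Int × Int)) (n : Int) : List (List Int) × Int :=
  let parent := PySem.List.pyRange 0 n 1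
  let rank := PySem.List.pyRepeat [(1 : Int)] n
  let lst := (PySem.List.pyRange 0 n 1).map (fun _ => ([] : List Int))
  match pvLoopA points_diff n points_diff (parent, rank, lst, 0, 0) with
  | none => ([], 0)   -- unreachable under Pre_: Python raises on these inputs
  | some (_, _, lstF, res, _) =>
    (lstF.map (fun ls => PySem.List.sorted ls (fun x => x) false ++ [0]), res)

-- ===== PORT B =====
-- the edge loop of B: quick-find over the component-label array 'comp';
-- state = (comp, chosen, res); a merge rebuilds comp with a single list comprehension
def pvLoopB (n : Int) :
    List (Int × Int × Int) → List Int × List (Int × Int) × Int →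
    Option (List Int × List (Int × Int) × Int)
  | [], st => some st
  | (u, v, w) :: rest, (comp, chosen, res) =>
    match PySem.List.pyGet? comp u, PySem.List.pyGet? comp v with
    | some cu, some cv =>
      if cu ≠ cv then
        let comp' := comp.map (fun c => if c = cv then cu else c)
        let chosen' := chosen ++ [(u, v)]
        if (chosen'.length : Int) = n - 1 then some (comp', chosen', res + w)
        else pvLoopB n rest (comp', chosen', res + w)
      else pvLoopB n rest (comp, chosen, res)
    | _, _ => none

-- adjacency of vertex i derived from the chosen edges
def pvAdjB (chosen : List (Int × Int)) (i : Int) : List Int :=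
  (chosen.filter (fun e => i == e.1 || i == e.2)).map
    (fun e => if e.1 = i then e.2 + 1 else e.1 + 1)

def kraskal_func_alt (points_diff : List (Int × Int × Int)) (n : Int) : List (List Int) × Int :=
  let comp := PySem.List.pyRange 0 n 1
  match pvLoopB n points_diff (comp, [], 0) with
  | none => ([], 0)
  | some (_, chosen, res) =>
    ((PySem.List.pyRange 0 n 1).map
       (fun i => PySem.List.sorted (pvAdjB chosen i) (fun x => x) false ++ [0]), res)

-- ===== PRECONDITION & SPEC =====
-- Pre_ excludes (a) association lists with duplicate (u, v) keys — the Python parameter is a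
-- dict, whose keys are unique, so such a list does not represent any dict input — and
-- (b) edges whose endpoints are not vertex indices 0..n-1: Python raises IndexError for
-- endpoints outside [-n, n), and a negative endpoint is malformed input outside the natural
-- domain of an n-vertex graph (A's list indexing silently wraps it around).
def Pre_kraskal_func (points_diff : List (Int × Int × Int)) (n : Int) : Prop :=
  (points_diff.map (fun e => (e.1, e.2.1))).Nodup ∧
  ∀ e ∈ points_diff, 0 ≤ e.1 ∧ e.1 < n ∧ 0 ≤ e.2.1 ∧ e.2.1 < n
instance (points_diff : List (Int × Int × Int)) (n : Int) : Decidable (Pre_kraskal_func points_diff n) := by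
  unfold Pre_kraskal_func; infer_instance

def pvWitness_kraskal_func : (List (Int × Int × Int)) × Int := ([(0, 1, 5), (1, 2, 3), (0, 2, 4)], 3)

def Spec_kraskal_func (points_diff : List (Int × Int × Int)) (n : Int) (out : List (List Int) × Int) : Prop := out = kraskal_func_alt points_diff n
instance (points_diff : List (Int × Int × Int)) (n : Int) (out : List (List Int) × Int) : Decidable (Spec_kraskal_func points_diff n out) := by
  unfold Spec_kraskal_func; infer_instance

-- ===== CLAIM (what is proved, stated in full; the proofs are below) =====
def Claim_equal_kraskal_func : Prop := ∀ (points_diff : List (Int × Int × Int)) (n : Int), Dom_kraskal_func points_diff n → Pre_kraskal_func points_diff n → Spec_kraskal_func points_diff n (kraskal_func points_diff n)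

-- ===== LEMMAS AND PROOFS =====
-- ---- generic helpers about Python list get/set on nonnegative indices ----
def pvGood (p : List Int) : Prop := ∀ y ∈ p, 0 ≤ y

theorem pvGetSet_same {α : Type} {p : List α} {i : Int} {v : α} (h0 : 0 ≤ i) (hlt : i.toNat < p.length) :
    PySem.List.pyGet? (PySem.List.pySetD p i v) i = some v := by
  rw [PySem.List.pySetD_of_nonneg _ _ h0, PySem.List.pyGet?_of_nonneg _ h0]
  exact List.getElem?_set_self hlt

theorem pvGetSet_ne {α : Type} {p : List α} {i j : Int} {v : α} (h0 : 0 ≤ i) (h1 : 0 ≤ j) (hne : j ≠ i) :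
    PySem.List.pyGet? (PySem.List.pySetD p i v) j = PySem.List.pyGet? p j := by
  rw [PySem.List.pySetD_of_nonneg _ _ h0, PySem.List.pyGet?_of_nonneg _ h1,
    PySem.List.pyGet?_of_nonneg _ h1]
  exact List.getElem?_set_ne (by omega)

theorem pvSet_id {α : Type} {p : List α} {i : Int} {v : α} (h0 : 0 ≤ i)
    (h : PySem.List.pyGet? p i = some v) : PySem.List.pySetD p i v = p := by
  rw [PySem.List.pySetD_of_nonneg _ _ h0]
  rw [PySem.List.pyGet?_of_nonneg _ h0] at h
  rcases List.getElem?_eq_some_iff.1 h with ⟨hl, hv⟩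
  subst hv
  exact List.set_getElem_self hl

theorem pvMem_set {α : Type} {p : List α} {i : Int} {v y : α} (h0 : 0 ≤ i) (h : y ∈ PySem.List.pySetD p i v) :
    y ∈ p ∨ y = v := by
  rw [PySem.List.pySetD_of_nonneg _ _ h0] at h
  exact List.mem_or_eq_of_mem_set h

theorem pvGet_total {α : Type} {p : List α} {i : Int} (h0 : 0 ≤ i) (hlt : i.toNat < p.length) :
    ∃ x, PySem.List.pyGet? p i = some x := by
  rw [PySem.List.pyGet?_of_nonneg _ h0]
  exact ⟨_, List.getElem?_eq_getElem hlt⟩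

-- ---- the walk-to-root trace ----
def pvTrace : Nat → List Int → Int → Option (List Int × Int)
  | 0, _, _ => none
  | f + 1, p, x =>
    match PySem.List.pyGet? p x with
    | none => none
    | some px => if px ≠ x then (pvTrace f p px).map (fun o => (x :: o.1, o.2)) else some ([], x)

def pvSetAll (p : List Int) (t : List Int) (r : Int) : List Int :=
  t.foldr (fun y q => PySem.List.pySetD q y r) p

theorem pvLen_setAll {p t r} : (pvSetAll p t r).length = p.length := by
  induction t with
  | nil => rfl
  | cons y t ih => simp [pvSetAll, PySem.List.length_pySetD] at ih ⊢; exact ih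

theorem pvMem_setAll {p t r y} (ht : ∀ y ∈ t, 0 ≤ y) (h : y ∈ pvSetAll p t r) :
    y ∈ p ∨ y = r := by
  induction t with
  | nil => exact Or.inl h
  | cons a t ih =>
    have h' : y ∈ PySem.List.pySetD (pvSetAll p t r) a r := h
    rcases pvMem_set (ht a (by simp)) h' with h2 | h2
    · exact ih (fun y hy => ht y (by simp [hy])) h2
    · exact Or.inr h2

theorem pvGet_setAll_ne {p : List Int} {t : List Int} {r z : Int}
    (hz : 0 ≤ z) (ht : ∀ y ∈ t, 0 ≤ y) (hnm : z ∉ t) :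
    PySem.List.pyGet? (pvSetAll p t r) z = PySem.List.pyGet? p z := by
  induction t with
  | nil => rfl
  | cons a t ih =>
    have ha : 0 ≤ a := ht a (by simp)
    have : pvSetAll p (a :: t) r = PySem.List.pySetD (pvSetAll p t r) a r := rfl
    rw [this, pvGetSet_ne ha hz (by simp at hnm; exact hnm.1)]
    exact ih (fun y hy => ht y (by simp [hy])) (by simp at hnm; exact hnm.2)

theorem pvTrace_unique {f g : Nat} {p : List Int} {x : Int} {o o'}
    (h : pvTrace f p x = some o) (h' : pvTrace g p x = some o') : o = o' := by
  induction f generalizing g x o o' with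
  | zero => simp [pvTrace] at h
  | succ f ih =>
    cases g with
    | zero => simp [pvTrace] at h'
    | succ g =>
      simp only [pvTrace] at h h'
      cases hg : PySem.List.pyGet? p x with
      | none => rw [hg] at h; exact absurd h (by simp)
      | some px =>
        rw [hg] at h h'
        by_cases hne : px = x
        · simp [hne] at h h'; rw [← h, ← h']
        · simp only [hne, ne_eq, not_false_iff, ite_true] at h h'
          cases ht : pvTrace f p px with
          | none => rw [ht] at h; exact absurd h (by simp)
          | some o1 =>
            cases ht' : pvTrace g p px with
            | none => rw [ht'] at h'; exact absurd h' (by simp)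
            | some o2 =>
              rw [ht] at h; rw [ht'] at h'
              have := ih ht ht'
              subst this
              simp at h h'
              rw [← h, ← h']

theorem pvTrace_drop {f : Nat} {p : List Int} {x : Int} {t : List Int} {r : Int}
    (h : pvTrace f p x = some (t, r)) :
    ∀ j ≤ t.length, pvTrace (f - j) p ((t ++ [r]).getD j 0) = some (t.drop j, r) := by
  induction f generalizing x t with
  | zero => simp [pvTrace] at h
  | succ f ih =>
    simp only [pvTrace] at h
    cases hg : PySem.List.pyGet? p x with
    | none => rw [hg] at h; exact absurd h (by simp)
    | some px =>
      rw [hg] at h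
      by_cases hne : px = x
      · simp only [hne, ne_eq, not_true_eq_false, ite_false] at h
        have ht : t = [] ∧ x = r := by
          cases h; exact ⟨rfl, rfl⟩
        rcases ht with ⟨ht, hx⟩
        subst ht; subst hx
        intro j hj
        have hj0 : j = 0 := by simpa using hj
        subst hj0
        simpa [pvTrace, hg, hne]
      · simp only [hne, ne_eq, not_false_iff, ite_true] at h
        cases ht : pvTrace f p px with
        | none => rw [ht] at h; exact absurd h (by simp)
        | some o =>
          rw [ht] at h
          obtain ⟨t', r'⟩ := o
          simp only [Option.map_some] at h
          have h1 : t = x :: t' ∧ r' = r := by cases h; exact ⟨rfl, rfl⟩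
          rcases h1 with ⟨h1, h2⟩
          subst h1; subst h2
          intro j hj
          cases j with
          | zero => simpa [pvTrace, hg, hne, ht]
          | succ j =>
            have := ih ht j (by simpa using hj)
            simpa using this

theorem pvTrace_root {f : Nat} {p : List Int} {x : Int} {t : List Int} {r : Int}
    (h : pvTrace f p x = some (t, r)) : PySem.List.pyGet? p r = some r := by
  induction f generalizing x t with
  | zero => simp [pvTrace] at h
  | succ f ih =>
    simp only [pvTrace] at h
    cases hg : PySem.List.pyGet? p x with
    | none => rw [hg] at h; exact absurd h (by simp)
    | some px =>
      rw [hg] at h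
      by_cases hne : px = x
      · simp only [hne, ne_eq, not_true_eq_false, ite_false] at h
        have : x = r := by cases h; rfl
        subst this; rw [← hne] at hg ⊢; exact hg
      · simp only [hne, ne_eq, not_false_iff, ite_true] at h
        cases ht : pvTrace f p px with
        | none => rw [ht] at h; exact absurd h (by simp)
        | some o =>
          rw [ht] at h
          obtain ⟨t', r'⟩ := o
          simp only [Option.map_some] at h
          have h2 : r' = r := by cases h; rfl
          subst h2
          exact ih ht

theorem pvTrace_mem {f : Nat} {p : List Int} {x : Int} {t : List Int} {r : Int}
    (h : pvTrace f p x = some (t, r)) : ∀ z ∈ t ++ [r], z = x ∨ z ∈ p := by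
  induction f generalizing x t with
  | zero => simp [pvTrace] at h
  | succ f ih =>
    simp only [pvTrace] at h
    cases hg : PySem.List.pyGet? p x with
    | none => rw [hg] at h; exact absurd h (by simp)
    | some px =>
      rw [hg] at h
      by_cases hne : px = x
      · simp only [hne, ne_eq, not_true_eq_false, ite_false] at h
        have h1 : t = [] ∧ x = r := by cases h; exact ⟨rfl, rfl⟩
        rcases h1 with ⟨h1, h2⟩; subst h1; subst h2
        intro z hz; simp at hz; exact Or.inl hz
      · simp only [hne, ne_eq, not_false_iff, ite_true] at h
        cases ht : pvTrace f p px with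
        | none => rw [ht] at h; exact absurd h (by simp)
        | some o =>
          rw [ht] at h
          obtain ⟨t', r'⟩ := o
          simp only [Option.map_some] at h
          have h1 : t = x :: t' ∧ r' = r := by cases h; exact ⟨rfl, rfl⟩
          rcases h1 with ⟨h1, h2⟩; subst h1; subst h2
          intro z hz
          simp only [List.cons_append, List.mem_cons] at hz
          rcases hz with hz | hz
          · exact Or.inl hz
          · rcases ih ht z hz with h2 | h2
            · subst h2; exact Or.inr (PySem.List.mem_of_pyGet?_eq_some _ hg)
            · exact Or.inr h2

theorem pvTrace_nodup {f : Nat} {p : List Int} {x : Int} {t : List Int} {r : Int}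
    (h : pvTrace f p x = some (t, r)) : (t ++ [r]).Nodup := by
  have key : ∀ a b : Nat, a < b → b < (t ++ [r]).length → (t ++ [r])[a]? ≠ (t ++ [r])[b]? := by
    intro a b hab hb hEq
    have ha' : a ≤ t.length := by simp at hb; omega
    have hb' : b ≤ t.length := by simp at hb; omega
    have da := pvTrace_drop h a ha'
    have db := pvTrace_drop h b hb'
    have hga : (t ++ [r]).getD a 0 = (t ++ [r]).getD b 0 := by
      simp only [List.getD, hEq]
    rw [hga] at da
    have := pvTrace_unique da db
    have hdr : t.drop a = t.drop b := congrArg Prod.fst this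
    have hlen : (t.drop a).length = (t.drop b).length := by rw [hdr]
    simp [List.length_drop] at hlen
    omega
  rw [List.nodup_iff_injective_get]
  intro ⟨a, ha⟩ ⟨b, hb⟩ hab
  by_contra hne
  have hne' : a ≠ b := by simpa using hne
  simp only [List.get_eq_getElem] at hab
  rcases Nat.lt_or_ge a b with hlt | hge
  · exact key a b hlt hb (by rw [List.getElem?_eq_getElem ha, List.getElem?_eq_getElem hb, hab])
  · have hlt : b < a := by omega
    exact key b a hlt ha (by rw [List.getElem?_eq_getElem ha, List.getElem?_eq_getElem hb, hab])

theorem pvTrace_head {f : Nat} {p : List Int} {x : Int} {t : List Int} {r : Int}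
    (h : pvTrace f p x = some (t, r)) : (t ++ [r]).getD 0 0 = x := by
  cases f with
  | zero => simp [pvTrace] at h
  | succ f =>
    simp only [pvTrace] at h
    cases hg : PySem.List.pyGet? p x with
    | none => rw [hg] at h; exact absurd h (by simp)
    | some px =>
      rw [hg] at h
      by_cases hne : px = x
      · simp only [hne, ne_eq, not_true_eq_false, ite_false] at h
        have h1 : t = [] ∧ x = r := by cases h; exact ⟨rfl, rfl⟩
        rcases h1 with ⟨h1, h2⟩; subst h1; subst h2; rfl
      · simp only [hne, ne_eq, not_false_iff, ite_true] at h
        cases ht : pvTrace f p px with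
        | none => rw [ht] at h; exact absurd h (by simp)
        | some o =>
          rw [ht] at h
          have h1 : t = x :: o.1 := by cases h; rfl
          subst h1; rfl

-- A's find computes the trace and sets every trace node to the root
theorem pvFindA_eq_trace (f : Nat) (p : List Int) (x : Int) :
    pvFindA f p x = (pvTrace f p x).map (fun o => (pvSetAll p o.1 o.2, o.2)) := by
  induction f generalizing p x with
  | zero => rfl
  | succ f ih =>
    simp only [pvFindA, pvTrace]
    cases hg : PySem.List.pyGet? p x with
    | none => rfl
    | some px =>
      by_cases hne : px = x
      · simp [hne, pvSetAll]
      · simp only [hne, ne_eq, not_false_iff, ite_true]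
        rw [ih]
        cases pvTrace f p px with
        | none => rfl
        | some o => rfl

theorem pvTrace_get {f : Nat} {p : List Int} {x : Int} {t : List Int} {r : Int}
    (h : pvTrace f p x = some (t, r)) : ∃ w, PySem.List.pyGet? p x = some w := by
  cases f with
  | zero => simp [pvTrace] at h
  | succ f =>
    simp only [pvTrace] at h
    cases hg : PySem.List.pyGet? p x with
    | none => rw [hg] at h; exact absurd h (by simp)
    | some px => exact ⟨px, rfl⟩

theorem pvTrace_self {p : List Int} {r : Int} (hgr : PySem.List.pyGet? p r = some r) (f : Nat) :
    pvTrace (f + 1) p r = some ([], r) := by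
  simp [pvTrace, hgr]

theorem pvTrace_two {p : List Int} {u ru : Int}
    (hgu : PySem.List.pyGet? p u = some ru) (hgr : PySem.List.pyGet? p ru = some ru) :
    ∃ t0 g, pvTrace (g + 1) p u = some (t0, ru) := by
  by_cases he : ru = u
  · subst he
    exact ⟨[], 0, pvTrace_self hgu 0⟩
  · refine ⟨[u], 1, ?_⟩
    simp [pvTrace, hgu, hgr, he]

theorem pvFindA_props {f : Nat} {p : List Int} {x : Int} {p' : List Int} {r : Int}
    (hx : 0 ≤ x) (hp : pvGood p) (h : pvFindA f p x = some (p', r)) :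
    pvGood p' ∧ p'.length = p.length ∧ 0 ≤ r ∧
    PySem.List.pyGet? p' x = some r ∧ PySem.List.pyGet? p' r = some r := by
  rw [pvFindA_eq_trace] at h
  cases ht : pvTrace f p x with
  | none => rw [ht] at h; exact absurd h (by simp)
  | some o =>
    obtain ⟨t, r2⟩ := o
    rw [ht] at h
    simp only [Option.map_some] at h
    have h' := Option.some.inj h
    have h2 : r2 = r := congrArg Prod.snd h'
    have hp' : p' = pvSetAll p t r := by rw [← h2]; exact (congrArg Prod.fst h').symm
    subst hp'
    rw [h2] at ht
    have hmem := pvTrace_mem ht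
    have hnn : ∀ z ∈ t ++ [r], 0 ≤ z := by
      intro z hz
      rcases hmem z hz with h1 | h1
      · subst h1; exact hx
      · exact hp z h1
    have hnd := pvTrace_nodup ht
    have htn : ∀ y ∈ t, 0 ≤ y := fun y hy => hnn y (by simp [hy])
    have hr : 0 ≤ r := hnn r (by simp)
    refine ⟨?_, pvLen_setAll, hr, ?_, ?_⟩
    · intro y hy
      rcases pvMem_setAll htn hy with h1 | h1
      · exact hp y h1
      · subst h1; exact hr
    · cases t with
      | nil =>
        have hxr : r = x := by simpa using pvTrace_head ht
        subst hxr
        exact pvTrace_root ht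
      | cons a t' =>
        have hax : a = x := by
          have := pvTrace_head ht
          simp only [List.cons_append, List.getD_cons_zero] at this
          exact this
        obtain ⟨w, hw⟩ := pvTrace_get ht
        have hlt : x.toNat < p.length := by
          rw [PySem.List.pyGet?_of_nonneg _ hx] at hw
          exact (List.getElem?_eq_some_iff.1 hw).1
        have e : pvSetAll p (a :: t') r = PySem.List.pySetD (pvSetAll p t' r) a r := rfl
        rw [e, hax]
        apply pvGetSet_same hx
        rw [pvLen_setAll]
        exact hlt
    · have hrt : r ∉ t := by
        intro hm
        exact List.disjoint_of_nodup_append hnd hm (by simp)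
      rw [pvGet_setAll_ne hr htn hrt]
      exact pvTrace_root ht

theorem pvFindA_pres {f : Nat} {p : List Int} {v u ru : Int} {p' : List Int} {rv : Int}
    (hu : 0 ≤ u) (hv : 0 ≤ v) (hp : pvGood p)
    (hgu : PySem.List.pyGet? p u = some ru) (hgr : PySem.List.pyGet? p ru = some ru)
    (hne : ru ≠ rv) (h : pvFindA f p v = some (p', rv)) :
    PySem.List.pyGet? p' u = some ru ∧ PySem.List.pyGet? p' ru = some ru := by
  rw [pvFindA_eq_trace] at h
  cases ht : pvTrace f p v with
  | none => rw [ht] at h; exact absurd h (by simp)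
  | some o =>
    obtain ⟨t, r2⟩ := o
    rw [ht] at h
    simp only [Option.map_some] at h
    have h' := Option.some.inj h
    have h2 : r2 = rv := congrArg Prod.snd h'
    have hp' : p' = pvSetAll p t rv := by rw [← h2]; exact (congrArg Prod.fst h').symm
    subst hp'
    rw [h2] at ht
    have hmem := pvTrace_mem ht
    have hnn : ∀ z ∈ t ++ [rv], 0 ≤ z := by
      intro z hz
      rcases hmem z hz with h1 | h1
      · subst h1; exact hv
      · exact hp z h1
    have htn : ∀ y ∈ t, 0 ≤ y := fun y hy => hnn y (by simp [hy])
    have hru : 0 ≤ ru := hp ru (PySem.List.mem_of_pyGet?_eq_some _ hgu)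
    have hkey : ∀ z : Int, PySem.List.pyGet? p z = some ru → z ∉ t := by
      intro z hgz hm
      obtain ⟨j, hj, hjz⟩ := List.mem_iff_getElem.1 hm
      have hgd : (t ++ [rv]).getD j 0 = z := by
        have hlt : j < (t ++ [rv]).length := by simp; omega
        have hel : (t ++ [rv])[j] = z := by
          rw [List.getElem_append_left (by omega)]; exact hjz
        simp [List.getD, List.getElem?_eq_getElem hlt, hel]
      have hd := pvTrace_drop ht j (by omega)
      rw [hgd] at hd
      obtain ⟨t0, g, hg2⟩ := pvTrace_two hgz hgr
      have hu2 := pvTrace_unique hd hg2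
      have : rv = ru := congrArg Prod.snd hu2
      exact hne this.symm
    have hu' : u ∉ t := hkey u hgu
    have hr' : ru ∉ t := hkey ru hgr
    exact ⟨by rw [pvGet_setAll_ne hu htn hu']; exact hgu,
           by rw [pvGet_setAll_ne hru htn hr']; exact hgr⟩

theorem pvFindA_noop {f : Nat} {p : List Int} {u r : Int} (hf : 2 ≤ f) (hu : 0 ≤ u)
    (hgu : PySem.List.pyGet? p u = some r) (hgr : PySem.List.pyGet? p r = some r) :
    pvFindA f p u = some (p, r) := by
  obtain ⟨f', rfl⟩ : ∃ f', f = f' + 2 := ⟨f - 2, by omega⟩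
  by_cases he : r = u
  · subst he
    simp [pvFindA, hgu]
  · have hid := pvSet_id hu hgu
    simp [pvFindA, hgu, hgr, he, hid]

-- ---- the union step, given the roots are already installed ----
theorem pvUnionA_eq {fuel : Nat} {p2 rk : List Int} {u v ru rv : Int}
    (hf : 2 ≤ fuel) (hu : 0 ≤ u) (hv : 0 ≤ v)
    (hgu : PySem.List.pyGet? p2 u = some ru) (hgru : PySem.List.pyGet? p2 ru = some ru)
    (hgv : PySem.List.pyGet? p2 v = some rv) (hgrv : PySem.List.pyGet? p2 rv = some rv)
    (hne : ru ≠ rv) :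
    pvUnionA fuel p2 rk u v =
      match PySem.List.pyGet? rk ru, PySem.List.pyGet? rk rv with
      | some au, some av =>
        some (if au < av then (PySem.List.pySetD p2 ru rv, rk)
              else (PySem.List.pySetD p2 rv ru,
                    if au = av then PySem.List.pySetD rk ru (au + 1) else rk))
      | _, _ => none := by
  unfold pvUnionA
  rw [pvFindA_noop hf hu hgu hgru]
  dsimp only
  rw [pvFindA_noop hf hv hgv hgrv]
  dsimp only
  simp only [hne, ne_eq, not_false_iff, ite_true]
  cases hau : PySem.List.pyGet? rk ru with
  | none => rfl
  | some au =>
    cases hav : PySem.List.pyGet? rk rv with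
    | none => rfl
    | some av =>
      rcases lt_trichotomy au av with h | h | h
      · simp [not_lt_of_gt h, h]
      · subst h
        simp
      · have hne2 : ¬ au = av := by omega
        simp [not_lt_of_gt h, hne2]
        intro hc
        exact absurd hc (by omega)

-- ---- dict lookup of the current edge's key ----
theorem pvLookupA_eq {pd : List (Int × Int × Int)} {u v w : Int}
    (hnd : (pd.map (fun e => (e.1, e.2.1))).Nodup) (hm : (u, v, w) ∈ pd) :
    pvLookupA pd u v = some w := by
  induction pd with
  | nil => simp at hm
  | cons e rest ih =>
    obtain ⟨a, b, w0⟩ := e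
    simp only [pvLookupA]
    simp only [List.map_cons, List.nodup_cons] at hnd
    by_cases hk : a = u ∧ b = v
    · rw [if_pos hk]
      rcases List.mem_cons.1 hm with hm | hm
      · have hw := congrArg (fun e => e.2.2) hm
        simp only at hw
        rw [hw]
      · exfalso
        apply hnd.1
        apply List.mem_map.2
        exact ⟨(u, v, w), hm, by simp [hk.1, hk.2]⟩
    · rw [if_neg hk]
      rcases List.mem_cons.1 hm with hm | hm
      · exfalso
        apply hk
        have h1 := congrArg (fun e => e.1) hm
        have h2 := congrArg (fun e => e.2.1) hm
        simp only at h1 h2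
        exact ⟨h1.symm, h2.symm⟩
      · exact ih hnd.2 hm

-- ---- the adjacency lists maintained by A, expressed from B's chosen-edge list ----
def pvBuild (n : Int) (chosen : List (Int × Int)) : List (List Int) :=
  (PySem.List.pyRange 0 n 1).map (fun i => pvAdjB chosen i)

theorem pvAdjB_append {c : List (Int × Int)} {e : Int × Int} {i : Int} :
    pvAdjB (c ++ [e]) i = pvAdjB c i ++ pvAdjB [e] i := by
  simp [pvAdjB, List.filter_append]

theorem pvAdjB_single {u v i : Int} (huv : u ≠ v) :
    pvAdjB [(u, v)] i = if i = u then [v + 1] else if i = v then [u + 1] else [] := by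
  unfold pvAdjB
  by_cases hiu : i = u
  · simp [hiu, huv]
  · by_cases hiv : i = v
    · simp [hiv, hiu, Ne.symm huv, huv]
    · simp [hiu, hiv]

theorem pvBuild_get {n i : Int} {c : List (Int × Int)} (h0 : 0 ≤ i) (hi : i < n) :
    PySem.List.pyGet? (pvBuild n c) i = some (pvAdjB c i) := by
  rw [PySem.List.pyGet?_of_nonneg _ h0]
  unfold pvBuild
  rw [List.getElem?_map]
  have hlt : i.toNat < (PySem.List.pyRange 0 n 1).length := by
    rw [PySem.List.length_pyRange_one]; omega
  rw [List.getElem?_eq_getElem hlt, PySem.List.getElem_pyRange_one]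
  simp [Int.toNat_of_nonneg h0]

theorem pvBuild_step {n u v : Int} {c : List (Int × Int)}
    (hu : 0 ≤ u) (hun : u < n) (hv : 0 ≤ v) (hvn : v < n) (huv : u ≠ v) :
    PySem.List.pySetD (PySem.List.pySetD (pvBuild n c) u (pvAdjB c u ++ [v + 1])) v
        (pvAdjB c v ++ [u + 1])
      = pvBuild n (c ++ [(u, v)]) := by
  have hlen : ∀ c' : List (Int × Int), (pvBuild n c').length = n.toNat := by
    intro c'
    unfold pvBuild
    rw [List.length_map, PySem.List.length_pyRange_one]
    simp
  have hget : ∀ (c' : List (Int × Int)) (k : Nat), k < n.toNat →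
      (pvBuild n c')[k]? = some (pvAdjB c' (k : Int)) := by
    intro c' k hk
    have h := pvBuild_get (n := n) (c := c') (i := (k : Int)) (by omega) (by omega)
    rwa [PySem.List.pyGet?_of_nonneg _ (by omega : (0:Int) ≤ (k:Int)), Int.toNat_natCast] at h
  rw [PySem.List.pySetD_of_nonneg _ _ hu, PySem.List.pySetD_of_nonneg _ _ hv]
  apply List.ext_getElem?
  intro k
  by_cases hk : k < n.toNat
  · have hkadj := hget (c ++ [(u, v)]) k hk
    have hsingle := pvAdjB_single (u := u) (v := v) (i := (k : Int)) huv
    by_cases hkv : k = v.toNat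
    · subst hkv
      have hvk : ((v.toNat : Nat) : Int) = v := Int.toNat_of_nonneg hv
      rw [List.getElem?_set_self (by simp only [List.length_set, hlen]; omega)]
      rw [hkadj, pvAdjB_append, hsingle]
      rw [if_neg (by omega : ¬ (((v.toNat : Nat) : Int) = u)), if_pos hvk, hvk]
    · by_cases hku : k = u.toNat
      · subst hku
        have huk : ((u.toNat : Nat) : Int) = u := Int.toNat_of_nonneg hu
        rw [List.getElem?_set_ne (by omega), List.getElem?_set_self (by rw [hlen]; omega)]
        rw [hkadj, pvAdjB_append, hsingle, if_pos huk, huk]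
      · rw [List.getElem?_set_ne (by omega), List.getElem?_set_ne (by omega)]
        rw [hkadj, hget c k hk, pvAdjB_append, hsingle]
        rw [if_neg (by omega : ¬ ((k:Int) = u)), if_neg (by omega : ¬ ((k:Int) = v))]
        simp
  · rw [List.getElem?_eq_none (by simp only [List.length_set, hlen]; omega),
      List.getElem?_eq_none (by rw [hlen]; omega)]

-- ---- fuel bounds for the trace ----
theorem pvTrace_mono {f : Nat} {p : List Int} {x : Int} {t : List Int} {r : Int}
    (h : pvTrace f p x = some (t, r)) :
    ∀ g, t.length < g → pvTrace g p x = some (t, r) := by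
  induction f generalizing x t with
  | zero => simp [pvTrace] at h
  | succ f ih =>
    intro g hg
    simp only [pvTrace] at h
    cases hget : PySem.List.pyGet? p x with
    | none => rw [hget] at h; exact absurd h (by simp)
    | some px =>
      rw [hget] at h
      obtain ⟨g', rfl⟩ : ∃ g', g = g' + 1 := ⟨g - 1, by omega⟩
      by_cases hne : px = x
      · simp only [hne, ne_eq, not_true_eq_false, ite_false] at h
        have h1 : t = [] ∧ x = r := by cases h; exact ⟨rfl, rfl⟩
        rcases h1 with ⟨h1, h2⟩; subst h1; subst h2
        simp [pvTrace, hne ▸ hget]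
      · simp only [hne, ne_eq, not_false_iff, ite_true] at h
        cases ht : pvTrace f p px with
        | none => rw [ht] at h; exact absurd h (by simp)
        | some o =>
          rw [ht] at h
          obtain ⟨t', r'⟩ := o
          simp only [Option.map_some] at h
          have h1 : t = x :: t' ∧ r' = r := by cases h; exact ⟨rfl, rfl⟩
          rcases h1 with ⟨h1, h2⟩; subst h1; subst h2
          have := ih ht g' (by simp at hg; omega)
          simp [pvTrace, hget, hne, this]

theorem pvTrace_len_lt {f : Nat} {p : List Int} {x : Int} {t : List Int} {r : Int}
    (hx : 0 ≤ x) (hp : pvGood p) (h : pvTrace f p x = some (t, r)) :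
    t.length < p.length := by
  have hnd := pvTrace_nodup h
  have hmem := pvTrace_mem h
  have hnn : ∀ z ∈ t ++ [r], 0 ≤ z := by
    intro z hz
    rcases hmem z hz with h1 | h1
    · subst h1; exact hx
    · exact hp z h1
  have hidx : ∀ z ∈ t ++ [r], z.toNat < p.length := by
    intro z hz
    obtain ⟨j, hj, hjz⟩ := List.mem_iff_getElem.1 hz
    have hj' : j ≤ t.length := by simp at hj; omega
    have hgd : (t ++ [r]).getD j 0 = z := by
      simp [List.getD, List.getElem?_eq_getElem hj, hjz]
    have hd := pvTrace_drop h j hj'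
    rw [hgd] at hd
    obtain ⟨w, hw⟩ := pvTrace_get hd
    rw [PySem.List.pyGet?_of_nonneg _ (hnn z hz)] at hw
    exact (List.getElem?_eq_some_iff.1 hw).1
  have hmap : ((t ++ [r]).map Int.toNat).Nodup := by
    refine List.Nodup.map_on ?_ hnd
    intro a ha b hb hab
    have := hnn a ha; have := hnn b hb; omega
  have hsub : ((t ++ [r]).map Int.toNat).toFinset ⊆ Finset.range p.length := by
    intro a ha
    simp only [List.mem_toFinset, List.mem_map] at ha
    obtain ⟨z, hz, rfl⟩ := ha
    exact Finset.mem_range.2 (hidx z hz)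
  have hcard := Finset.card_le_card hsub
  rw [List.toFinset_card_of_nodup hmap, Finset.card_range, List.length_map] at hcard
  simp at hcard
  omega

-- ---- setting parent[y] := q redirects exactly the classes whose walk passes through y ----
theorem pvRoot_set {p : List Int} {y q : Int}
    (hp : pvGood p) (hy : 0 ≤ y) (hq : 0 ≤ q) (hyq : y ≠ q)
    (hyv : y.toNat < p.length)
    (hqr : PySem.List.pyGet? p q = some q) :
    ∀ (f : Nat) (z : Int) (t : List Int) (r : Int), 0 ≤ z → pvTrace f p z = some (t, r) →
      ∃ t', pvTrace (p.length + 1) (PySem.List.pySetD p y q) z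
        = some (t', if y ∈ t ++ [r] then q else r) := by
  have hlen' : (PySem.List.pySetD p y q).length = p.length := by
    simp [PySem.List.length_pySetD]
  have hgood' : pvGood (PySem.List.pySetD p y q) := by
    intro z hz
    rcases pvMem_set hy hz with h | h
    · exact hp z h
    · subst h; exact hq
  have hgq' : PySem.List.pyGet? (PySem.List.pySetD p y q) q = some q := by
    rw [pvGetSet_ne hy hq (Ne.symm hyq)]; exact hqr
  have hty : pvTrace (p.length + 1) (PySem.List.pySetD p y q) y = some ([y], q) := by
    obtain ⟨m, hm⟩ : ∃ m, p.length + 1 = m + 2 := ⟨p.length - 1, by omega⟩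
    have h1 : PySem.List.pyGet? (PySem.List.pySetD p y q) y = some q := pvGetSet_same hy hyv
    rw [hm]
    simp only [pvTrace, h1, hgq']
    simp [Ne.symm hyq]
  intro f
  induction f with
  | zero => intro z t r hz h; simp [pvTrace] at h
  | succ f ih =>
    intro z t r hz h
    have horig := h
    simp only [pvTrace] at h
    cases hg : PySem.List.pyGet? p z with
    | none => rw [hg] at h; exact absurd h (by simp)
    | some pz =>
      rw [hg] at h
      by_cases hzy : z = y
      · subst hzy
        have hhead := pvTrace_head horig
        have hmem : z ∈ t ++ [r] := by
          have hlenpos : 0 < (t ++ [r]).length := by simp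
          have he : (t ++ [r]).getD 0 0 = (t ++ [r])[0] := by
            simp [List.getD, List.getElem?_eq_getElem hlenpos]
          rw [he] at hhead
          rw [← hhead]
          exact List.getElem_mem _
        rw [if_pos hmem]
        exact ⟨[z], hty⟩
      · by_cases hne : pz = z
        · simp only [hne, ne_eq, not_true_eq_false, ite_false] at h
          have h1 : t = [] ∧ z = r := by cases h; exact ⟨rfl, rfl⟩
          rcases h1 with ⟨h1, h2⟩; subst h1; subst h2
          have hmem : y ∉ ([] : List Int) ++ [z] := by
            simp [Ne.symm hzy]
          rw [if_neg hmem]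
          have hg' : PySem.List.pyGet? (PySem.List.pySetD p y q) z = some z := by
            rw [pvGetSet_ne hy hz hzy]; rw [← hne] at hg ⊢; exact hg
          exact ⟨[], pvTrace_self hg' p.length⟩
        · simp only [hne, ne_eq, not_false_iff, ite_true] at h
          cases ht : pvTrace f p pz with
          | none => rw [ht] at h; exact absurd h (by simp)
          | some o =>
            rw [ht] at h
            obtain ⟨t2, r2⟩ := o
            simp only [Option.map_some] at h
            have h1 : t = z :: t2 ∧ r2 = r := by cases h; exact ⟨rfl, rfl⟩
            rcases h1 with ⟨h1, h2⟩; subst h1; subst h2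
            have hpz0 : 0 ≤ pz := hp pz (PySem.List.mem_of_pyGet?_eq_some _ hg)
            obtain ⟨t', ht'⟩ := ih pz t2 r2 hpz0 ht
            have hlt : t'.length < p.length := by
              have := pvTrace_len_lt hpz0 hgood' ht'
              rwa [hlen'] at this
            have hts := pvTrace_mono ht' p.length hlt
            have hg' : PySem.List.pyGet? (PySem.List.pySetD p y q) z = some pz := by
              rw [pvGetSet_ne hy hz hzy]; exact hg
            refine ⟨z :: t', ?_⟩
            have hmemiff : (y ∈ (z :: t2) ++ [r2]) ↔ (y ∈ t2 ++ [r2]) := by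
              simp [Ne.symm hzy]
            have hite : (if y ∈ (z :: t2) ++ [r2] then q else r2)
                = (if y ∈ t2 ++ [r2] then q else r2) := if_congr hmemiff rfl rfl
            rw [hite]
            simp [pvTrace, hg', hne, hts]

-- y lies on z's walk iff z's root is y, when y is its own parent
theorem pvMemPath_iff_root {f : Nat} {p : List Int} {y z : Int} {t : List Int} {r : Int}
    (hyr : PySem.List.pyGet? p y = some y) (h : pvTrace f p z = some (t, r)) :
    y ∈ t ++ [r] ↔ r = y := by
  constructor
  · intro hm
    obtain ⟨j, hj, hjz⟩ := List.mem_iff_getElem.1 hm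
    have hj' : j ≤ t.length := by simp at hj; omega
    have hgd : (t ++ [r]).getD j 0 = y := by
      simp [List.getD, List.getElem?_eq_getElem hj, hjz]
    have hd := pvTrace_drop h j hj'
    rw [hgd] at hd
    have hfix := pvTrace_self hyr 0
    have := pvTrace_unique hd hfix
    have hdr : t.drop j = [] := congrArg Prod.fst this
    have hr : r = y := congrArg Prod.snd this
    exact hr
  · intro hr; subst hr; simp

-- roots are preserved when a node is re-pointed at its own root (path compression step)
theorem pvRootPres {a : List Int} {y : Int} {g : Nat} {ty : List Int} {r : Int}
    (ha : pvGood a) (hy : 0 ≤ y)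
    (hyt : pvTrace g a y = some (ty, r)) :
    ∀ (f : Nat) (z : Int) (t : List Int) (rz : Int), 0 ≤ z → pvTrace f a z = some (t, rz) →
      ∃ t', pvTrace (a.length + 1) (PySem.List.pySetD a y r) z = some (t', rz) := by
  intro f z t rz hz h
  by_cases hyr : y = r
  · have hgy : PySem.List.pyGet? a y = some r := by
      rw [hyr]; exact pvTrace_root hyt
    rw [pvSet_id hy hgy]
    exact ⟨t, pvTrace_mono h (a.length + 1) (by have := pvTrace_len_lt hz ha h; omega)⟩
  · have hr0 : 0 ≤ r := by
      rcases pvTrace_mem hyt r (by simp) with h1 | h1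
      · subst h1; exact hy
      · exact ha r h1
    have hyv : y.toNat < a.length := by
      obtain ⟨w, hw⟩ := pvTrace_get hyt
      rw [PySem.List.pyGet?_of_nonneg _ hy] at hw
      exact (List.getElem?_eq_some_iff.1 hw).1
    have hqr : PySem.List.pyGet? a r = some r := pvTrace_root hyt
    obtain ⟨t', ht'⟩ := pvRoot_set ha hy hr0 hyr hyv hqr f z t rz hz h
    refine ⟨t', ?_⟩
    rw [ht']
    congr 1
    by_cases hm : y ∈ t ++ [rz]
    · rw [if_pos hm]
      congr 1
      obtain ⟨j, hj, hjz⟩ := List.mem_iff_getElem.1 hm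
      have hj' : j ≤ t.length := by simp at hj; omega
      have hgd : (t ++ [rz]).getD j 0 = y := by
        simp [List.getD, List.getElem?_eq_getElem hj, hjz]
      have hd := pvTrace_drop h j hj'
      rw [hgd] at hd
      exact (congrArg Prod.snd (pvTrace_unique hd hyt)).symm
    · rw [if_neg hm]

-- roots are preserved by writing the root over every node of one walk
theorem pvRootSetAll {a : List Int} {tl : List Int} {r : Int}
    (ha : pvGood a) (hr : 0 ≤ r)
    (hpos : ∀ y ∈ tl, 0 ≤ y)
    (hall : ∀ y ∈ tl, ∃ g ty, pvTrace g a y = some (ty, r)) :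
    pvGood (pvSetAll a tl r) ∧ (pvSetAll a tl r).length = a.length ∧
    ∀ (f : Nat) (z : Int) (t : List Int) (rz : Int), 0 ≤ z → pvTrace f a z = some (t, rz) →
      ∃ t', pvTrace (a.length + 1) (pvSetAll a tl r) z = some (t', rz) := by
  induction tl with
  | nil =>
    refine ⟨ha, rfl, ?_⟩
    intro f z t rz hz h
    exact ⟨t, pvTrace_mono h (a.length + 1) (by have := pvTrace_len_lt hz ha h; omega)⟩
  | cons y tl ih =>
    obtain ⟨ihg, ihl, ihtr⟩ := ih (fun y hy => hpos y (by simp [hy]))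
      (fun y hy => hall y (by simp [hy]))
    have hy0 : 0 ≤ y := hpos y (by simp)
    obtain ⟨g, ty, hyt⟩ := hall y (by simp)
    obtain ⟨ty', hyt'⟩ := ihtr g y ty r hy0 hyt
    have hstep : pvSetAll a (y :: tl) r = PySem.List.pySetD (pvSetAll a tl r) y r := rfl
    refine ⟨?_, ?_, ?_⟩
    · rw [hstep]
      intro z hz
      rcases pvMem_set hy0 hz with h | h
      · exact ihg z h
      · subst h; exact hr
    · rw [hstep, PySem.List.length_pySetD, ihl]
    · intro f z t rz hz h
      obtain ⟨t1, ht1⟩ := ihtr f z t rz hz h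
      rw [hstep]
      have h2 := pvRootPres ihg hy0 hyt' (a.length + 1) z t1 rz hz ht1
      rw [ihl] at h2
      exact h2

-- A's find preserves every root
theorem pvFindA_roots {f : Nat} {p : List Int} {x : Int} {p' : List Int} {r : Int}
    (hp : pvGood p) (hx : 0 ≤ x) (h : pvFindA f p x = some (p', r)) :
    ∀ (g : Nat) (z : Int) (t : List Int) (rz : Int), 0 ≤ z → pvTrace g p z = some (t, rz) →
      ∃ t', pvTrace (p.length + 1) p' z = some (t', rz) := by
  rw [pvFindA_eq_trace] at h
  cases ht : pvTrace f p x with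
  | none => rw [ht] at h; exact absurd h (by simp)
  | some o =>
    obtain ⟨tl, r2⟩ := o
    rw [ht] at h
    simp only [Option.map_some] at h
    have h' := Option.some.inj h
    have h2 : r2 = r := congrArg Prod.snd h'
    have hp' : p' = pvSetAll p tl r := by rw [← h2]; exact (congrArg Prod.fst h').symm
    subst hp'
    rw [h2] at ht
    have hmem := pvTrace_mem ht
    have hpos : ∀ y ∈ tl, 0 ≤ y := by
      intro y hy
      rcases hmem y (by simp [hy]) with h1 | h1
      · subst h1; exact hx
      · exact hp y h1
    have hr0 : 0 ≤ r := by
      rcases hmem r (by simp) with h1 | h1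
      · subst h1; exact hx
      · exact hp r h1
    have hall : ∀ y ∈ tl, ∃ g ty, pvTrace g p y = some (ty, r) := by
      intro y hy
      obtain ⟨j, hj, hjz⟩ := List.mem_iff_getElem.1 hy
      have hj' : j ≤ tl.length := by omega
      have hgd : (tl ++ [r]).getD j 0 = y := by
        have hlt : j < (tl ++ [r]).length := by simp; omega
        have hel : (tl ++ [r])[j] = y := by
          rw [List.getElem_append_left (by omega)]; exact hjz
        simp [List.getD, List.getElem?_eq_getElem hlt, hel]
      have hd := pvTrace_drop ht j hj'
      rw [hgd] at hd
      exact ⟨f - j, tl.drop j, hd⟩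
    exact (pvRootSetAll hp hr0 hpos hall).2.2

-- ---- the quick-find invariant ----
def pvInv (n : Int) (p comp : List Int) : Prop :=
  p.length = n.toNat ∧ comp.length = n.toNat ∧ pvGood p ∧ (∀ y ∈ p, y < n) ∧
  (∀ i : Int, 0 ≤ i → i < n → ∃ o, pvTrace (p.length + 1) p i = some o) ∧
  (∀ i j : Int, 0 ≤ i → i < n → 0 ≤ j → j < n →
    ((pvTrace (p.length + 1) p i).map Prod.snd = (pvTrace (p.length + 1) p j).map Prod.snd ↔
     PySem.List.pyGet? comp i = PySem.List.pyGet? comp j))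

theorem pvInv_transfer {n : Int} {p p2 comp : List Int}
    (hI : pvInv n p comp) (hlen : p2.length = p.length) (hg2 : pvGood p2)
    (hb2 : ∀ y ∈ p2, y < n)
    (htr : ∀ (f : Nat) (z : Int) (t : List Int) (rz : Int), 0 ≤ z → pvTrace f p z = some (t, rz) →
      ∃ t', pvTrace (p.length + 1) p2 z = some (t', rz)) :
    pvInv n p2 comp := by
  obtain ⟨hpl, hcl, hpg, hpb, htot, hiff⟩ := hI
  have hroot : ∀ i : Int, 0 ≤ i → i < n →
      ∃ r, (pvTrace (p.length + 1) p i).map Prod.snd = some r ∧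
           (pvTrace (p2.length + 1) p2 i).map Prod.snd = some r := by
    intro i h0 h1
    obtain ⟨⟨t, r⟩, ht⟩ := htot i h0 h1
    obtain ⟨t', ht'⟩ := htr _ i t r h0 ht
    rw [← hlen] at ht'
    exact ⟨r, by rw [ht]; rfl, by rw [ht']; rfl⟩
  refine ⟨by rw [hlen, hpl], hcl, hg2, hb2, ?_, ?_⟩
  · intro i h0 h1
    obtain ⟨⟨t, r⟩, ht⟩ := htot i h0 h1
    obtain ⟨t', ht'⟩ := htr _ i t r h0 ht
    rw [← hlen] at ht'
    exact ⟨(t', r), ht'⟩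
  · intro i j hi0 hi1 hj0 hj1
    obtain ⟨ri, hri1, hri2⟩ := hroot i hi0 hi1
    obtain ⟨rj, hrj1, hrj2⟩ := hroot j hj0 hj1
    rw [hri2, hrj2, ← hri1, ← hrj1]
    exact hiff i j hi0 hi1 hj0 hj1

-- merged labels are equal iff the old labels were equal or both lay in the merged pair
theorem pvMergeEq (a b x y : Int) :
    ((if a = y then x else a) = (if b = y then x else b)) ↔
    (a = b ∨ ((a = x ∨ a = y) ∧ (b = x ∨ b = y))) := by
  split_ifs <;> omega

-- the invariant survives one union step (either orientation of the parent write)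
theorem pvInv_union {n : Int} {p2 comp : List Int} {u v ru rv cu cv y q : Int}
    (hI : pvInv n p2 comp)
    (hu : 0 ≤ u) (hun : u < n) (hv : 0 ≤ v) (hvn : v < n)
    (hg2u : PySem.List.pyGet? p2 u = some ru) (hg2ru : PySem.List.pyGet? p2 ru = some ru)
    (hg2v : PySem.List.pyGet? p2 v = some rv) (hg2rv : PySem.List.pyGet? p2 rv = some rv)
    (hne : ru ≠ rv)
    (hcu : PySem.List.pyGet? comp u = some cu) (hcv : PySem.List.pyGet? comp v = some cv)
    (hyq : (y = ru ∧ q = rv) ∨ (y = rv ∧ q = ru)) :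
    pvInv n (PySem.List.pySetD p2 y q) (comp.map (fun c => if c = cv then cu else c)) := by
  obtain ⟨hpl, hcl, hpg, hpb, htot, hiff⟩ := hI
  have hy0 : 0 ≤ y := by
    rcases hyq with ⟨h1, _⟩ | ⟨h1, _⟩ <;> subst h1
    · exact hpg _ (PySem.List.mem_of_pyGet?_eq_some _ hg2u)
    · exact hpg _ (PySem.List.mem_of_pyGet?_eq_some _ hg2v)
  have hq0 : 0 ≤ q := by
    rcases hyq with ⟨_, h1⟩ | ⟨_, h1⟩ <;> subst h1
    · exact hpg _ (PySem.List.mem_of_pyGet?_eq_some _ hg2v)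
    · exact hpg _ (PySem.List.mem_of_pyGet?_eq_some _ hg2u)
  have hqn : q < n := by
    rcases hyq with ⟨_, h1⟩ | ⟨_, h1⟩ <;> subst h1
    · exact hpb _ (PySem.List.mem_of_pyGet?_eq_some _ hg2v)
    · exact hpb _ (PySem.List.mem_of_pyGet?_eq_some _ hg2u)
  have hyq' : y ≠ q := by rcases hyq with ⟨h1, h2⟩ | ⟨h1, h2⟩ <;> subst h1 <;> subst h2
    <;> [exact hne; exact Ne.symm hne]
  have hgy : PySem.List.pyGet? p2 y = some y := by
    rcases hyq with ⟨h1, _⟩ | ⟨h1, _⟩ <;> subst h1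
    · exact hg2ru
    · exact hg2rv
  have hgq : PySem.List.pyGet? p2 q = some q := by
    rcases hyq with ⟨_, h1⟩ | ⟨_, h1⟩ <;> subst h1
    · exact hg2rv
    · exact hg2ru
  have hyv : y.toNat < p2.length := by
    rw [PySem.List.pyGet?_of_nonneg _ hy0] at hgy
    exact (List.getElem?_eq_some_iff.1 hgy).1
  -- roots in the new array: the class of y is redirected to q
  have hstep : ∀ (z : Int) (t : List Int) (rz : Int), 0 ≤ z →
      pvTrace (p2.length + 1) p2 z = some (t, rz) →
      ∃ t', pvTrace (p2.length + 1) (PySem.List.pySetD p2 y q) z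
        = some (t', if rz = y then q else rz) := by
    intro z t rz hz ht
    obtain ⟨t', ht'⟩ := pvRoot_set hpg hy0 hq0 hyq' hyv hgq _ z t rz hz ht
    have hite : (if y ∈ t ++ [rz] then q else rz) = (if rz = y then q else rz) := by
      have hm := pvMemPath_iff_root hgy ht
      by_cases hc : rz = y
      · rw [if_pos (hm.2 hc), if_pos hc]
      · rw [if_neg (fun h => hc (hm.1 h)), if_neg hc]
    rw [hite] at ht'
    exact ⟨t', ht'⟩
  -- canonical roots of u and v
  have hrootof : ∀ (w rw : Int), 0 ≤ w → w < n → PySem.List.pyGet? p2 w = some rw →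
      PySem.List.pyGet? p2 rw = some rw →
      (pvTrace (p2.length + 1) p2 w).map Prod.snd = some rw := by
    intro w rw h0 h1 hgw hgrw
    obtain ⟨⟨t, r⟩, ht⟩ := htot w h0 h1
    obtain ⟨t0, g, hg2⟩ := pvTrace_two hgw hgrw
    have := pvTrace_unique ht hg2
    have hr : r = rw := congrArg Prod.snd this
    rw [ht]; simpa using hr
  have hrootu := hrootof u ru hu hun hg2u hg2ru
  have hrootv := hrootof v rv hv hvn hg2v hg2rv
  have hglen : (PySem.List.pySetD p2 y q).length = p2.length := by
    simp [PySem.List.length_pySetD]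
  refine ⟨by rw [hglen, hpl], by rw [List.length_map, hcl], ?_, ?_, ?_, ?_⟩
  · intro z hz
    rcases pvMem_set hy0 hz with h | h
    · exact hpg z h
    · subst h; exact hq0
  · intro z hz
    rcases pvMem_set hy0 hz with h | h
    · exact hpb z h
    · subst h; exact hqn
  · intro i h0 h1
    obtain ⟨⟨t, r⟩, ht⟩ := htot i h0 h1
    obtain ⟨t', ht'⟩ := hstep i t r h0 ht
    rw [← hglen] at ht'
    exact ⟨_, ht'⟩
  · intro i j hi0 hi1 hj0 hj1
    obtain ⟨⟨ti, ri⟩, hti⟩ := htot i hi0 hi1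
    obtain ⟨⟨tj, rj⟩, htj⟩ := htot j hj0 hj1
    obtain ⟨ti', hti'⟩ := hstep i ti ri hi0 hti
    obtain ⟨tj', htj'⟩ := hstep j tj rj hj0 htj
    rw [← hglen] at hti' htj'
    rw [hti', htj']
    -- comp lookups
    have hclook : ∀ (k : Int) (ck : Int), 0 ≤ k →
        PySem.List.pyGet? comp k = some ck →
        PySem.List.pyGet? (comp.map (fun c => if c = cv then cu else c)) k
          = some (if ck = cv then cu else ck) := by
      intro k ck h0 hk
      rw [PySem.List.pyGet?_of_nonneg _ h0] at hk ⊢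
      rw [List.getElem?_map, hk]
      rfl
    obtain ⟨ci, hci⟩ := pvGet_total (p := comp) hi0 (by rw [hcl]; omega)
    obtain ⟨cj, hcj⟩ := pvGet_total (p := comp) hj0 (by rw [hcl]; omega)
    rw [hclook i ci hi0 hci, hclook j cj hj0 hcj]
    -- scalar correspondences
    have hcorr : ∀ (k rk ck : Int), 0 ≤ k → k < n →
        (pvTrace (p2.length + 1) p2 k).map Prod.snd = some rk →
        PySem.List.pyGet? comp k = some ck →
        ((rk = ru ↔ ck = cu) ∧ (rk = rv ↔ ck = cv)) := by
      intro k rk ck h0 h1 hrk hck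
      constructor
      · have := hiff k u h0 h1 hu hun
        rw [hrk, hrootu, hck, hcu] at this
        constructor
        · intro hc; exact Option.some.inj (this.1 (by rw [hc]))
        · intro hc; exact Option.some.inj (this.2 (by rw [hc]))
      · have := hiff k v h0 h1 hv hvn
        rw [hrk, hrootv, hck, hcv] at this
        constructor
        · intro hc; exact Option.some.inj (this.1 (by rw [hc]))
        · intro hc; exact Option.some.inj (this.2 (by rw [hc]))
    have hmapi : (pvTrace (p2.length + 1) p2 i).map Prod.snd = some ri := by rw [hti]; rfl
    have hmapj : (pvTrace (p2.length + 1) p2 j).map Prod.snd = some rj := by rw [htj]; rfl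
    obtain ⟨hiu, hiv⟩ := hcorr i ri ci hi0 hi1 hmapi hci
    obtain ⟨hju, hjv⟩ := hcorr j rj cj hj0 hj1 hmapj hcj
    have hijr : ri = rj ↔ ci = cj := by
      have := hiff i j hi0 hi1 hj0 hj1
      rw [hmapi, hmapj, hci, hcj] at this
      constructor
      · intro hc; exact Option.some.inj (this.1 (by rw [hc]))
      · intro hc; exact Option.some.inj (this.2 (by rw [hc]))
    have hL : ((if ri = y then q else ri) = (if rj = y then q else rj)) ↔
        (ri = rj ∨ ((ri = ru ∨ ri = rv) ∧ (rj = ru ∨ rj = rv))) := by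
      rcases hyq with ⟨h1, h2⟩ | ⟨h1, h2⟩ <;> rw [h1, h2]
      · rw [pvMergeEq _ _ rv ru]; omega
      · rw [pvMergeEq _ _ ru rv]
    have hR : ((if ci = cv then cu else ci) = (if cj = cv then cu else cj)) ↔
        (ci = cj ∨ ((ci = cu ∨ ci = cv) ∧ (cj = cu ∨ cj = cv))) :=
      pvMergeEq _ _ cu cv
    simp only [Option.map_some, Option.some.injEq]
    rw [hL, hR]
    constructor
    · intro h
      rcases h with h | ⟨h1, h2⟩
      · exact Or.inl (hijr.1 h)
      · refine Or.inr ⟨?_, ?_⟩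
        · rcases h1 with h | h
          exacts [Or.inl (hiu.1 h), Or.inr (hiv.1 h)]
        · rcases h2 with h | h
          exacts [Or.inl (hju.1 h), Or.inr (hjv.1 h)]
    · intro h
      rcases h with h | ⟨h1, h2⟩
      · exact Or.inl (hijr.2 h)
      · refine Or.inr ⟨?_, ?_⟩
        · rcases h1 with h | h
          exacts [Or.inl (hiu.2 h), Or.inr (hiv.2 h)]
        · rcases h2 with h | h
          exacts [Or.inl (hju.2 h), Or.inr (hjv.2 h)]

-- ---- the edge loops of A and B agree step by step ----
theorem pvLoop_eq (pd : List (Int × Int × Int)) (n : Int)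
    (hnd : (pd.map (fun e => (e.1, e.2.1))).Nodup)
    (hbd : ∀ e ∈ pd, 0 ≤ e.1 ∧ e.1 < n ∧ 0 ≤ e.2.1 ∧ e.2.1 < n) :
    ∀ (rest : List (Int × Int × Int)) (p rk comp : List Int) (chosen : List (Int × Int)) (res : Int),
      (∀ e ∈ rest, e ∈ pd) → pvInv n p comp → rk.length = n.toNat →
      ((chosen.length : Int) ≠ n - 1) →
      (pvLoopA pd n rest (p, rk, pvBuild n chosen, res, (chosen.length : Int))).map
          (fun st => (st.2.2.1, st.2.2.2.1))
        = (pvLoopB n rest (comp, chosen, res)).map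
          (fun st => (pvBuild n st.2.1, st.2.2)) := by
  intro rest
  induction rest with
  | nil => intro p rk comp chosen res _ _ _ _; rfl
  | cons e rest ih =>
    obtain ⟨u, v, w⟩ := e
    intro p rk comp chosen res hrest hI hrk hcnt
    obtain ⟨hplen, hclen, hpg, hpb, htot, hiff⟩ := hI
    obtain ⟨hu, hun, hv, hvn⟩ := hbd _ (hrest _ List.mem_cons_self)
    dsimp only at hu hun hv hvn
    obtain ⟨⟨tu, ru⟩, htu⟩ := htot u hu hun
    obtain ⟨⟨tv, rv⟩, htv⟩ := htot v hv hvn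
    -- A's first find
    have hfindu : pvFindA (p.length + 1) p u = some (pvSetAll p tu ru, ru) := by
      rw [pvFindA_eq_trace, htu]; rfl
    obtain ⟨hg1, hlen1, hru0, hg1u, hg1r⟩ := pvFindA_props hu hpg hfindu
    have htr1 := pvFindA_roots hpg hu hfindu
    have hb1 : ∀ z ∈ pvSetAll p tu ru, z < n := by
      intro z hz
      have hpos : ∀ a ∈ tu, 0 ≤ a := by
        intro a ha
        rcases pvTrace_mem htu a (by simp [ha]) with h1 | h1
        · rw [h1]; exact hu
        · exact hpg a h1
      rcases pvMem_setAll hpos hz with h1 | h1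
      · exact hpb z h1
      · rcases pvTrace_mem htu ru (by simp) with h2 | h2
        · rw [h1, h2]; exact hun
        · rw [h1]; exact hpb _ h2
    -- trace of v in p1, and A's second find
    obtain ⟨tv1, htv1⟩ := htr1 _ v tv rv hv htv
    have hfindv : pvFindA ((pvSetAll p tu ru).length + 1) (pvSetAll p tu ru) v
        = some (pvSetAll (pvSetAll p tu ru) tv1 rv, rv) := by
      rw [pvFindA_eq_trace, hlen1, htv1]; rfl
    obtain ⟨hg2, hlen2, hrv0, hg2v, hg2r⟩ := pvFindA_props hv hg1 hfindv
    have htr2 := pvFindA_roots hg1 hv hfindv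
    have hb2 : ∀ z ∈ pvSetAll (pvSetAll p tu ru) tv1 rv, z < n := by
      intro z hz
      have hpos : ∀ a ∈ tv1, 0 ≤ a := by
        intro a ha
        rcases pvTrace_mem htv1 a (by simp [ha]) with h1 | h1
        · rw [h1]; exact hv
        · exact hg1 a h1
      rcases pvMem_setAll hpos hz with h1 | h1
      · exact hb1 z h1
      · rcases pvTrace_mem htv1 rv (by simp) with h2 | h2
        · rw [h1, h2]; exact hvn
        · rw [h1]; exact hb1 _ h2
    -- composed transfer p → p2
    have htr12 : ∀ (f : Nat) (z : Int) (t : List Int) (rz : Int), 0 ≤ z →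
        pvTrace f p z = some (t, rz) →
        ∃ t', pvTrace (p.length + 1) (pvSetAll (pvSetAll p tu ru) tv1 rv) z = some (t', rz) := by
      intro f z t rz hz h
      obtain ⟨t1, h1⟩ := htr1 f z t rz hz h
      rw [← hlen1]
      exact htr2 _ z t1 rz hz h1
    have hI2 : pvInv n (pvSetAll (pvSetAll p tu ru) tv1 rv) comp :=
      pvInv_transfer ⟨hplen, hclen, hpg, hpb, htot, hiff⟩ (by rw [hlen2, hlen1]) hg2 hb2 htr12
    -- B's lookups
    obtain ⟨cu, hcu⟩ := pvGet_total (p := comp) hu (by rw [hclen]; omega)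
    obtain ⟨cv, hcv⟩ := pvGet_total (p := comp) hv (by rw [hclen]; omega)
    -- the branch condition agrees
    have hbr : (ru = rv) ↔ (cu = cv) := by
      have := hiff u v hu hun hv hvn
      rw [htu, htv, hcu, hcv] at this
      simp only [Option.map_some, Option.some.injEq] at this
      exact this
    simp only [pvLoopA, pvLoopB]
    rw [hfindu]
    dsimp only
    rw [hfindv]
    dsimp only
    rw [hcu, hcv]
    dsimp only
    by_cases hrr : ru = rv
    · have hcc : cu = cv := hbr.1 hrr
      rw [if_neg (show ¬(ru ≠ rv) by simp [hrr])]
      rw [if_neg hcnt]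
      rw [if_neg (show ¬(cu ≠ cv) by simp [hcc])]
      exact ih (pvSetAll (pvSetAll p tu ru) tv1 rv) rk comp chosen res
        (fun e he => hrest e (List.mem_cons_of_mem _ he)) hI2 hrk hcnt
    · have hcc : ¬ cu = cv := fun hc => hrr (hbr.2 hc)
      -- roots of u installed in p2
      obtain ⟨hg2u, hg2ru⟩ := pvFindA_pres hu hv hg1 hg1u hg1r hrr hfindv
      have hfuel : 2 ≤ (pvSetAll (pvSetAll p tu ru) tv1 rv).length + 1 := by
        have hmem := PySem.List.mem_of_pyGet?_eq_some _ hg2v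
        have := List.length_pos_of_mem hmem
        omega
      have huv : u ≠ v := by
        intro he
        apply hrr
        subst he
        have := pvTrace_unique htu htv
        exact congrArg Prod.snd this
      -- ru, rv bounded: rank lookups succeed
      have hrun : ru < n := hb2 _ (PySem.List.mem_of_pyGet?_eq_some _ hg2ru)
      have hrvn : rv < n := hb2 _ (PySem.List.mem_of_pyGet?_eq_some _ hg2r)
      obtain ⟨au, hau⟩ := pvGet_total (p := rk) hru0 (by rw [hrk]; omega)
      obtain ⟨av, hav⟩ := pvGet_total (p := rk) hrv0 (by rw [hrk]; omega)
      simp only [hrr, hcc, ne_eq, not_false_iff, ite_true]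
      rw [pvUnionA_eq hfuel hu hv hg2u hg2ru hg2v hg2r hrr]
      rw [hau, hav]
      dsimp only
      rw [pvBuild_get hu hun]
      dsimp only
      rw [pvGetSet_ne hu hv (Ne.symm huv), pvBuild_get hv hvn]
      dsimp only
      rw [pvLookupA_eq hnd (hrest _ List.mem_cons_self)]
      dsimp only
      have hc : (((chosen ++ [(u, v)]).length : Nat) : Int) = (chosen.length : Int) + 1 := by
        simp
      have hstep := pvBuild_step (n := n) (c := chosen) hu hun hv hvn huv
      have hrk' : (if au = av then PySem.List.pySetD rk ru (au + 1) else rk).length = n.toNat := by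
        split_ifs <;> simp [PySem.List.length_pySetD, hrk]
      by_cases hcmp : au < av
      · simp only [hcmp, ite_true]
        by_cases hbr2 : (chosen.length : Int) + 1 = n - 1
        · rw [hc, if_pos hbr2, if_pos hbr2]
          simp only [Option.map_some]
          rw [hstep]
        · rw [hc, if_neg hbr2, if_neg hbr2]
          have hI3 : pvInv n (PySem.List.pySetD (pvSetAll (pvSetAll p tu ru) tv1 rv) ru rv)
              (comp.map (fun c => if c = cv then cu else c)) :=
            pvInv_union hI2 hu hun hv hvn hg2u hg2ru hg2v hg2r hrr hcu hcv (Or.inl ⟨rfl, rfl⟩)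
          have := ih (PySem.List.pySetD (pvSetAll (pvSetAll p tu ru) tv1 rv) ru rv) rk
            (comp.map (fun c => if c = cv then cu else c)) (chosen ++ [(u, v)]) (res + w)
            (fun e he => hrest e (List.mem_cons_of_mem _ he)) hI3 hrk
            (by rw [hc]; exact hbr2)
          rw [hstep]
          rw [hc] at this
          exact this
      · simp only [hcmp, ite_false]
        by_cases hbr2 : (chosen.length : Int) + 1 = n - 1
        · rw [hc, if_pos hbr2, if_pos hbr2]
          simp only [Option.map_some]
          rw [hstep]
        · rw [hc, if_neg hbr2, if_neg hbr2]
          have hI3 : pvInv n (PySem.List.pySetD (pvSetAll (pvSetAll p tu ru) tv1 rv) rv ru)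
              (comp.map (fun c => if c = cv then cu else c)) :=
            pvInv_union hI2 hu hun hv hvn hg2u hg2ru hg2v hg2r hrr hcu hcv (Or.inr ⟨rfl, rfl⟩)
          have := ih (PySem.List.pySetD (pvSetAll (pvSetAll p tu ru) tv1 rv) rv ru)
            (if au = av then PySem.List.pySetD rk ru (au + 1) else rk)
            (comp.map (fun c => if c = cv then cu else c)) (chosen ++ [(u, v)]) (res + w)
            (fun e he => hrest e (List.mem_cons_of_mem _ he)) hI3 hrk'
            (by rw [hc]; exact hbr2)
          rw [hstep]
          rw [hc] at this
          exact this

-- ---- the degenerate n = 1 loop on B's side: nothing is ever added ----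
theorem pvLoopB_one :
    ∀ (rest : List (Int × Int × Int)) (chosen : List (Int × Int)) (res : Int),
      (∀ e ∈ rest, e.1 = 0 ∧ e.2.1 = 0) →
      pvLoopB 1 rest ([0], chosen, res) = some ([0], chosen, res) := by
  intro rest
  induction rest with
  | nil => intro chosen res _; rfl
  | cons e rest ih =>
    obtain ⟨u, v, w⟩ := e
    intro chosen res hall
    obtain ⟨hu, hv⟩ := hall _ List.mem_cons_self
    dsimp only at hu hv
    subst hu; subst hv
    simp only [pvLoopB]
    have hget : PySem.List.pyGet? ([0] : List Int) 0 = some 0 := by decide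
    rw [hget]
    dsimp only
    simp only [ne_eq, not_true_eq_false, ite_false]
    exact ih chosen res (fun e he => hall e (List.mem_cons_of_mem _ he))

-- initial invariant: parent = comp = range n
theorem pvRangeGet {n i : Int} (h0 : 0 ≤ i) (h1 : i < n) :
    PySem.List.pyGet? (PySem.List.pyRange 0 n 1) i = some i := by
  rw [PySem.List.pyGet?_of_nonneg _ h0]
  have hlt : i.toNat < (PySem.List.pyRange 0 n 1).length := by
    rw [PySem.List.length_pyRange_one]; omega
  rw [List.getElem?_eq_getElem hlt, PySem.List.getElem_pyRange_one]
  simp [Int.toNat_of_nonneg h0]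

theorem pvInv_init (n : Int) : pvInv n (PySem.List.pyRange 0 n 1) (PySem.List.pyRange 0 n 1) := by
  have hlen : (PySem.List.pyRange 0 n 1).length = n.toNat := by
    rw [PySem.List.length_pyRange_one]; simp
  have htr : ∀ i : Int, 0 ≤ i → i < n →
      pvTrace ((PySem.List.pyRange 0 n 1).length + 1) (PySem.List.pyRange 0 n 1) i
        = some ([], i) := by
    intro i h0 h1
    exact pvTrace_self (pvRangeGet h0 h1) _
  refine ⟨hlen, hlen, ?_, ?_, ?_, ?_⟩
  · intro y hy; exact ((PySem.List.mem_pyRange_one).1 hy).1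
  · intro y hy; exact ((PySem.List.mem_pyRange_one).1 hy).2
  · intro i h0 h1; exact ⟨_, htr i h0 h1⟩
  · intro i j hi0 hi1 hj0 hj1
    rw [htr i hi0 hi1, htr j hj0 hj1, pvRangeGet hi0 hi1, pvRangeGet hj0 hj1]
    simp

-- ===== VERDICT (by name: the statement is the Claim_ definition above) =====
theorem kraskal_func_spec : Claim_equal_kraskal_func := by
  unfold Claim_equal_kraskal_func
  intro pd n _hdom hpre
  unfold Spec_kraskal_func
  obtain ⟨hnd, hbd⟩ := hpre
  by_cases hn1 : n = 1
  · subst hn1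
    cases pd with
    | nil => decide
    | cons e rest =>
      obtain ⟨u, v, w⟩ := e
      obtain ⟨hu, hun, hv, hvn⟩ := hbd _ List.mem_cons_self
      dsimp only at hu hun hv hvn
      have hu0 : u = 0 := by omega
      have hv0 : v = 0 := by omega
      subst hu0; subst hv0
      have hall : ∀ e ∈ (((0 : Int), (0 : Int), w) :: rest), e.1 = 0 ∧ e.2.1 = 0 := by
        intro e he
        rcases hbd e he with ⟨h1, h2, h3, h4⟩
        exact ⟨by omega, by omega⟩
      simp only [kraskal_func, kraskal_func_alt]
      rw [show PySem.List.pyRange 0 1 1 = [0] by decide,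
          show PySem.List.pyRepeat [(1 : Int)] 1 = [1] by decide]
      simp only [pvLoopA]
      have hfA : pvFindA (([0] : List Int).length + 1) [0] 0 = some ([0], 0) := by decide
      rw [hfA]
      dsimp only
      rw [hfA]
      dsimp only
      simp only [ne_eq, not_true_eq_false, ite_false]
      rw [if_pos (by norm_num : (0 : Int) = 1 - 1)]
      rw [pvLoopB_one (((0 : Int), (0 : Int), w) :: rest) [] 0 hall]
      decide
  · have hmain := pvLoop_eq pd n hnd hbd pd (PySem.List.pyRange 0 n 1)
      (PySem.List.pyRepeat [(1 : Int)] n) (PySem.List.pyRange 0 n 1) [] 0 (fun e he => he)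
      (pvInv_init n)
      (by rw [PySem.List.pyRepeat_singleton, List.length_replicate])
      (by simp; omega)
    simp only [List.length_nil, Nat.cast_zero] at hmain
    have hinit : (PySem.List.pyRange 0 n 1).map (fun _ => ([] : List Int)) = pvBuild n [] := rfl
    simp only [kraskal_func, kraskal_func_alt, hinit]
    cases hA : pvLoopA pd n pd
        (PySem.List.pyRange 0 n 1, PySem.List.pyRepeat [(1 : Int)] n, pvBuild n [], 0, 0) with
    | none =>
      rw [hA] at hmain
      cases hB : pvLoopB n pd (PySem.List.pyRange 0 n 1, [], 0) with
      | none => rfl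
      | some stB => rw [hB] at hmain; simp at hmain
    | some stA =>
      rw [hA] at hmain
      cases hB : pvLoopB n pd (PySem.List.pyRange 0 n 1, [], 0) with
      | none => rw [hB] at hmain; simp at hmain
      | some stB =>
        rw [hB] at hmain
        simp only [Option.map_some, Option.some.injEq] at hmain
        obtain ⟨st1, st2, lstA, resA, cntA⟩ := stA
        obtain ⟨scomp, chosenB, resB⟩ := stB
        dsimp only at hmain ⊢
        have h1 : lstA = pvBuild n chosenB := congrArg Prod.fst hmain
        have h2 : resA = resB := congrArg Prod.snd hmain
        rw [h1, h2]
        unfold pvBuild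
        rw [List.map_map]
        rfl
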